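-- pv_equiv track=rewrite | github.com/toki866/ApexTraderAI | tools/check_leak_alignment_v3.py | _detect_action_col
-- ===== SOURCE A (Python) =====
-- from typing import List, Optional, Tuple
--
-- def _detect_action_col(cols: List[str]) -> Optional[str]:
--     for c in cols:
--         if c.lower() in ("action", "act", "a"):
--             return c
--     for c in cols:
--         if "action" in c.lower():
--             return c
--     return None
-- ===== SOURCE B (Python) =====
-- from typing import List, Optional
--
-- def _detect_action_col(cols: List[str]) -> Optional[str]:
--     fallback = None
--     for c in cols:
--         lc = c.lower()
--         if lc in ("action", "act", "a"):
--             return c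
--         if fallback is None and "action" in lc:
--             fallback = c
--     return fallback
-- ===== Notes on version B (the rewrite author's own statement) =====
-- stated objective: simpler
-- what changed: Replaces A's two sequential scans (exact-name pass, then substring pass) with a single pass that returns immediately on an exact match and records the first substring match in a fallback variable returned after the loop.
import Mathlib
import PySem

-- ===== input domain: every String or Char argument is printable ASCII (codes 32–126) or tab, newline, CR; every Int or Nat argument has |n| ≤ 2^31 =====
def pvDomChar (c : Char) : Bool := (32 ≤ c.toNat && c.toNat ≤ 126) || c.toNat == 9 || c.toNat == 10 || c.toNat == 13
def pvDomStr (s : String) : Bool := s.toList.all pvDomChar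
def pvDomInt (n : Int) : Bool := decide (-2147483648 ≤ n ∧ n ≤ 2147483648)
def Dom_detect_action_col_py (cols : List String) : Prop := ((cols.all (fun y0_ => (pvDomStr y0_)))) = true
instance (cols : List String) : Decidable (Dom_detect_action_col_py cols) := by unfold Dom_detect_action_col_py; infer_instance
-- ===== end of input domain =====

-- B merges A's two scans into one pass with a fallback variable (objective: simpler).
-- ===== PORT A =====
-- first loop: exact lowercase name match
def aScan1 : List String → Option String
  | [] => none
  | c :: rest =>
    if PySem.Str.lower c ∈ (["action", "act", "a"] : List String) then some c
    else aScan1 rest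

-- second loop: substring match
def aScan2 : List String → Option String
  | [] => none
  | c :: rest =>
    if PySem.Str.isIn "action" (PySem.Str.lower c) then some c
    else aScan2 rest

def detect_action_col_py (cols : List String) : Option String :=
  match aScan1 cols with
  | some c => some c
  | none => aScan2 cols

-- ===== PORT B =====
-- single pass: early return on exact match, first substring match kept as fallback
def bLoop : List String → Option String → Option String
  | [], fallback => fallback
  | c :: rest, fallback =>
    let lc := PySem.Str.lower c
    if lc ∈ (["action", "act", "a"] : List String) then some c
    else bLoop rest (if fallback = none ∧ PySem.Str.isIn "action" lc then some c else fallback)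

def detect_action_col_py_alt (cols : List String) : Option String :=
  bLoop cols none

-- ===== PRECONDITION & SPEC =====
def Spec_detect_action_col_py (cols : List String) (out : Option String) : Prop := out = detect_action_col_py_alt cols
instance (cols : List String) (out : Option String) : Decidable (Spec_detect_action_col_py cols out) := by unfold Spec_detect_action_col_py; infer_instance

-- ===== CLAIM (what is proved, stated in full; the proofs are below) =====
def Claim_equal_detect_action_col_py : Prop := ∀ (cols : List String), Dom_detect_action_col_py cols → Spec_detect_action_col_py cols (detect_action_col_py cols)

-- ===== LEMMAS AND PROOFS =====

-- ===== VERDICT (by name: the statement is the Claim_ definition above) =====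
-- loop invariant: one pass with fallback = exact-scan, else fallback, else substring-scan
lemma bLoop_eq (cols : List String) : ∀ fb : Option String,
    bLoop cols fb = ((aScan1 cols).or (fb.or (aScan2 cols))) := by
  induction cols with
  | nil => intro fb; cases fb <;> simp [bLoop, aScan1, aScan2]
  | cons c rest ih =>
    intro fb
    simp only [bLoop, aScan1, aScan2]
    by_cases hx : PySem.Str.lower c ∈ (["action", "act", "a"] : List String)
    · simp [hx]
    · simp only [hx, if_false, ih]
      by_cases hs : PySem.Str.isIn "action" (PySem.Str.lower c) = true
      all_goals simp [PySem.Str.isIn, PySem.Str.toList_lower] at hs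
      · cases fb <;> simp [hs]
      · cases fb <;> simp [hs]

theorem detect_action_col_py_spec : Claim_equal_detect_action_col_py := by
  intro cols _
  unfold Spec_detect_action_col_py detect_action_col_py detect_action_col_py_alt
  rw [bLoop_eq]
  cases h : aScan1 cols <;> simp
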